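-- pv_equiv track=rewrite | github.com/Akashdeepsingh1/project | 2020/LargestMAlignedSubset.py | largestMAligned
-- ===== SOURCE A (Python) =====
-- def largestMAligned(arr, m):
--     min_num = min(arr)
--     max_num = max(arr)
--
--     final_count = 0
--     for i in range(len(arr)):
--         count = 1
--         for j in range(i+1,len(arr)):
--             if (abs(arr[j]) + abs(arr[i]))%m == 0:
--                 count+=1
--
--         if final_count < count:
--             final_count = count
--
--     return final_count
-- ===== SOURCE B (Python) =====
-- def largestMAligned(arr, m):
--     best = 0
--     cnt = {}
--     for x in reversed(arr):
--         r = abs(x) % m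
--         c = 1 + cnt.get((-r) % m, 0)
--         if c > best:
--             best = c
--         cnt[r] = cnt.get(r, 0) + 1
--     return best
-- ===== Notes on version B (the rewrite author's own statement) =====
-- stated objective: faster
-- what changed: Replaced the quadratic double scan by a single right-to-left pass that maintains a dict counting residues |x|%m of the suffix, so each element's partner count is one dict lookup.
-- outside the precondition, e.g. on largestMAligned([114], 0): A returns 1, B raises ZeroDivisionError
import Mathlib
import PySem

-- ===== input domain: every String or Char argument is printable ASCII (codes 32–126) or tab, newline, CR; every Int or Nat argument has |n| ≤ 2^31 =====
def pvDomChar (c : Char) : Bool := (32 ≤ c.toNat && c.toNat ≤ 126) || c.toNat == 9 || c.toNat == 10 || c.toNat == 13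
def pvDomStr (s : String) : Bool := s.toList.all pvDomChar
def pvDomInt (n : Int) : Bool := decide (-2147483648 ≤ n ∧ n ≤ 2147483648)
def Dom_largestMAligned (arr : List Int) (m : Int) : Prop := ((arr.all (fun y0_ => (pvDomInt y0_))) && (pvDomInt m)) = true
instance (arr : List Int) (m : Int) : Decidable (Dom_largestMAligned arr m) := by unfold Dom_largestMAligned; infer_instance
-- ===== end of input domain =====

-- B replaces A's quadratic double scan by one right-to-left pass over the list with a dict of suffix residue counts (objective: faster).

-- ===== PORT A =====
def largestMAligned (arr : List Int) (m : Int) : Int :=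
  let _min_num := PySem.List.min? arr (fun y => y)   -- min(arr)/max(arr): computed but unused; raise on [], excluded by Pre_
  let _max_num := PySem.List.max? arr (fun y => y)
  (PySem.List.pyRange 0 (PySem.List.len arr) 1).foldl (fun final_count i =>
    let count := (PySem.List.pyRange (i + 1) (PySem.List.len arr) 1).foldl (fun count j =>
      if PySem.Int.mod (|PySem.List.pyGetD arr j 0| + |PySem.List.pyGetD arr i 0|) m = 0
      then count + 1 else count) 1
    if final_count < count then count else final_count) 0

-- ===== PORT B =====
def largestMAligned_alt (arr : List Int) (m : Int) : Int :=
  (arr.reverse.foldl (fun (st : Int × PySem.Dict Int Int) x =>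
      let r := PySem.Int.mod |x| m
      let c := 1 + st.2.getD (PySem.Int.mod (-r) m) 0
      let best := if c > st.1 then c else st.1
      (best, st.2.insert r (st.2.getD r 0 + 1))) (0, PySem.Dict.empty)).1

-- ===== PRECONDITION & SPEC =====
-- Pre_ excludes arr = [] (A raises ValueError from min) and m = 0 (A raises ZeroDivisionError, except on single-element
-- lists where its inner loop is empty so A accidentally returns 1 while B's own residue computation raises).
def Pre_largestMAligned (arr : List Int) (m : Int) : Prop := arr ≠ [] ∧ m ≠ 0
instance (arr : List Int) (m : Int) : Decidable (Pre_largestMAligned arr m) := by unfold Pre_largestMAligned; infer_instance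
def pvWitness_largestMAligned : List Int × Int := ([3, 5], 2)

def Spec_largestMAligned (arr : List Int) (m : Int) (out : Int) : Prop := out = largestMAligned_alt arr m
instance (arr : List Int) (m : Int) (out : Int) : Decidable (Spec_largestMAligned arr m out) := by unfold Spec_largestMAligned; infer_instance

-- ===== CLAIM (what is proved, stated in full; the proofs are below) =====
def Claim_equal_largestMAligned : Prop := ∀ (arr : List Int) (m : Int), Dom_largestMAligned arr m → Pre_largestMAligned arr m → Spec_largestMAligned arr m (largestMAligned arr m)

-- ===== LEMMAS AND PROOFS =====

-- common characterisation of both programs: max over positions of (1 + #later partners)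
def pvSpec (m : Int) : List Int → Int
  | [] => 0
  | x :: xs => max (pvSpec m xs)
      (1 + (xs.countP (fun y => decide (PySem.Int.mod (|y| + |x|) m = 0)) : Int))

def pvCnt (m : Int) (arr : List Int) (k : Nat) : Int :=
  1 + ((arr.drop (k + 1)).countP (fun y => decide (PySem.Int.mod (|y| + |arr.getD k 0|) m = 0)) : Int)

theorem pv_mod_eq_iff (m a b : Int) (hm : m ≠ 0) :
    PySem.Int.mod a m = PySem.Int.mod b m ↔ m ∣ (a - b) := by
  have ha := PySem.Int.floordiv_mul_add_mod a m
  have hb := PySem.Int.floordiv_mul_add_mod b m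
  constructor
  · intro h
    exact ⟨PySem.Int.floordiv a m - PySem.Int.floordiv b m, by rw [mul_sub, mul_comm m, mul_comm m]; linarith⟩
  · intro ⟨k, hk⟩
    have hd : PySem.Int.mod a m - PySem.Int.mod b m = m * (k - (PySem.Int.floordiv a m - PySem.Int.floordiv b m)) := by
      rw [mul_sub, mul_sub, mul_comm m, mul_comm m]; linarith
    have hdvd : m ∣ (PySem.Int.mod a m - PySem.Int.mod b m) := ⟨_, hd⟩
    have hlt : |PySem.Int.mod a m - PySem.Int.mod b m| < |m| := by
      rcases lt_or_gt_of_ne hm with hneg | hpos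
      · have h1 := PySem.Int.mod_neg_bounds a hneg
        have h2 := PySem.Int.mod_neg_bounds b hneg
        rw [abs_lt, abs_of_neg hneg]; omega
      · have h1 := PySem.Int.mod_nonneg a hpos
        have h2 := PySem.Int.mod_nonneg b hpos
        have h3 := PySem.Int.mod_lt a hpos
        have h4 := PySem.Int.mod_lt b hpos
        rw [abs_lt, abs_of_pos hpos]; omega
    have h0 := Int.eq_zero_of_abs_lt_dvd ((abs_dvd m _).mpr hdvd) hlt
    omega

theorem pv_cond (m x y : Int) (hm : m ≠ 0) :
    (PySem.Int.mod (|y| + |x|) m = 0) ↔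
      PySem.Int.mod |y| m = PySem.Int.mod (-(PySem.Int.mod |x| m)) m := by
  rw [PySem.Int.mod_eq_zero_iff_dvd, pv_mod_eq_iff m _ _ hm]
  have h1 : m ∣ (|x| - PySem.Int.mod |x| m) :=
    ⟨PySem.Int.floordiv |x| m, by have := PySem.Int.floordiv_mul_add_mod |x| m; rw [mul_comm]; linarith⟩
  constructor
  · intro h
    have h2 := dvd_sub h h1
    have heq : |y| + |x| - (|x| - PySem.Int.mod |x| m) = |y| - -(PySem.Int.mod |x| m) := by ring
    rwa [heq] at h2
  · intro h
    have h2 := dvd_add h h1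
    have heq : |y| - -(PySem.Int.mod |x| m) + (|x| - PySem.Int.mod |x| m) = |y| + |x| := by ring
    rwa [heq] at h2

theorem pv_A_eq_range (arr : List Int) (m : Int) :
    largestMAligned arr m =
      (List.range arr.length).foldl (fun fc k => max fc (pvCnt m arr k)) 0 := by
  unfold largestMAligned
  simp only [PySem.List.len_eq]
  rw [PySem.List.pyRange_one 0]
  simp only [sub_zero, Int.toNat_natCast, List.foldl_map, zero_add]
  refine PySem.List.foldl_congr_mem _ _ _ _ ?_
  intro fc k hk
  rw [show ((k : Int) + 1) = ((k + 1 : Nat) : Int) by push_cast; ring]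
  simp only [PySem.List.foldl_ite_add_one, PySem.List.pyGetD_natCast]
  have hdrop : (PySem.List.pyRange ((k + 1 : Nat) : Int) ((arr.length : Nat) : Int) 1).map
      (fun j => PySem.List.pyGetD arr j 0) = arr.drop (k + 1) := by
    have h0 := PySem.List.map_pyGetD_pyRange' arr 0 (a := ((k + 1 : Nat) : Int)) (by positivity)
    simpa using h0
  have hc : (PySem.List.pyRange ((k + 1 : Nat) : Int) ((arr.length : Nat) : Int) 1).countP
        (fun x => decide (PySem.Int.mod (|PySem.List.pyGetD arr x 0| + |arr.getD k 0|) m = 0))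
      = (arr.drop (k + 1)).countP (fun y => decide (PySem.Int.mod (|y| + |arr.getD k 0|) m = 0)) := by
    rw [← hdrop, List.countP_map]; rfl
  rw [hc]
  simp only [pvCnt]
  split_ifs <;> omega

theorem pv_foldl_max_init (f : Nat → Int) (l : List Nat) (a b : Int) :
    l.foldl (fun fc k => max fc (f k)) (max a b)
      = max (l.foldl (fun fc k => max fc (f k)) a) b := by
  induction l generalizing a with
  | nil => rfl
  | cons h t ih => simp only [List.foldl_cons, max_right_comm a b (f h)]; exact ih _

theorem pv_range_fold_eq_spec (m : Int) (arr : List Int) :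
    (List.range arr.length).foldl (fun fc k => max fc (pvCnt m arr k)) 0 = pvSpec m arr := by
  induction arr with
  | nil => rfl
  | cons x xs ih =>
    rw [List.length_cons, List.range_succ_eq_map, List.foldl_cons, List.foldl_map]
    have hshift : ∀ fc (k : Nat), max fc (pvCnt m (x :: xs) (k + 1)) = max fc (pvCnt m xs k) := by
      intro fc k
      simp [pvCnt, List.drop_succ_cons]
    simp only [hshift]
    rw [pv_foldl_max_init (fun k => pvCnt m xs k) (List.range xs.length) 0 (pvCnt m (x :: xs) 0)]
    rw [ih]
    simp [pvSpec, pvCnt]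

theorem pv_A_eq_spec (arr : List Int) (m : Int) : largestMAligned arr m = pvSpec m arr := by
  rw [pv_A_eq_range, pv_range_fold_eq_spec]

theorem pv_B_inv (m : Int) (hm : m ≠ 0) (l : List Int) :
    (l.foldr (fun x (st : Int × PySem.Dict Int Int) =>
        let r := PySem.Int.mod |x| m
        let c := 1 + st.2.getD (PySem.Int.mod (-r) m) 0
        let best := if c > st.1 then c else st.1
        (best, st.2.insert r (st.2.getD r 0 + 1))) (0, PySem.Dict.empty)).1 = pvSpec m l
    ∧ ∀ v, (l.foldr (fun x (st : Int × PySem.Dict Int Int) =>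
        let r := PySem.Int.mod |x| m
        let c := 1 + st.2.getD (PySem.Int.mod (-r) m) 0
        let best := if c > st.1 then c else st.1
        (best, st.2.insert r (st.2.getD r 0 + 1))) (0, PySem.Dict.empty)).2.getD v 0
      = (l.countP (fun y => decide (PySem.Int.mod |y| m = v)) : Int) := by
  induction l with
  | nil =>
    exact ⟨rfl, fun v => by simp [PySem.Dict.empty, PySem.Dict.getD, PySem.Dict.get?]⟩
  | cons x xs ih =>
    obtain ⟨ih1, ih2⟩ := ih
    constructor
    · simp only [List.foldr_cons]
      rw [ih1, ih2]
      have hcnt : xs.countP (fun y => decide (PySem.Int.mod |y| m = PySem.Int.mod (-(PySem.Int.mod |x| m)) m))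
          = xs.countP (fun y => decide (PySem.Int.mod (|y| + |x|) m = 0)) := by
        refine List.countP_congr ?_
        intro y _
        simp [pv_cond m x y hm]
      rw [hcnt]
      show (if _ > pvSpec m xs then _ else pvSpec m xs) = pvSpec m (x :: xs)
      simp only [pvSpec]
      split_ifs with h
      · exact (max_eq_right (le_of_lt h)).symm
      · exact (max_eq_left (not_lt.mp h)).symm
    · intro v
      simp only [List.foldr_cons]
      by_cases hv : v = PySem.Int.mod |x| m
      · rw [hv, PySem.Dict.getD_insert_self, ih2]
        rw [List.countP_cons]
        simp
      · rw [PySem.Dict.getD_insert_of_ne _ _ _ hv, ih2]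
        rw [List.countP_cons]
        simp [Ne.symm hv]

theorem pv_B_eq_spec (arr : List Int) (m : Int) (hm : m ≠ 0) :
    largestMAligned_alt arr m = pvSpec m arr := by
  unfold largestMAligned_alt
  rw [List.foldl_reverse]
  exact (pv_B_inv m hm arr).1

-- ===== VERDICT (by name: the statement is the Claim_ definition above) =====
theorem largestMAligned_spec : Claim_equal_largestMAligned := by
  intro arr m _ hpre
  unfold Spec_largestMAligned
  rw [pv_A_eq_spec, pv_B_eq_spec arr m hpre.2]
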